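-- pv_equiv track=rewrite | github.com/OkhotnikovFN/Yandex-Algorithms | trainings_2.0/division_b/hw_8/task_d/d.py | dfs
-- ===== SOURCE A (Python) =====
-- from typing import List
--
-- def dfs(cur_index, neighbors: List, sub_size: List, visited: List) -> int:
--     """
--     Функция которая вычисляет максимальное количество последовательно
--     соединенных бусинок присутствует в полученной фигуре.
--
--     :param cur_index: индекс обрабатываемой бусинки
--     :type cur_index: int
--     :param neighbors: дерево соединенных бусинок
--     :type neighbors: List
--     :param sub_size: список длин для бусинок
--     :type sub_size: List
--     :param visited: список обработанных бусинок
--     :type visited: List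
--
--     :return: максимальное количество последовательно соединенных бусинок
--     :rtype: int
--     """
--     visited[cur_index] = True
--     best = 1
--     max1 = -1
--     max2 = -1
--     sub_size[cur_index] = 1
--     for next_val in neighbors[cur_index]:
--         if not visited[next_val]:
--             best = max(dfs(next_val, neighbors, sub_size, visited), best)
--             if sub_size[next_val] > max1:
--                 max2 = max1
--                 max1 = sub_size[next_val]
--             elif sub_size[next_val] > max2:
--                 max2 = sub_size[next_val]
--     best = max(best, max1 + 1)
--     best = max(best, max1 + max2 + 1)
--     sub_size[cur_index] = max(sub_size[cur_index], max1 + 1)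
--     return best
-- ===== SOURCE B (Python) =====
-- def dfs(cur_index, neighbors, sub_size, visited):
--     # Iterative post-order traversal with an explicit stack of frames
--     # (node, remaining-neighbors, best, max1, max2, pending-child) instead
--     # of A's recursion; performs the same in-place updates of visited and
--     # sub_size as A.
--     visited[cur_index] = True
--     sub_size[cur_index] = 1
--     stack = [(cur_index, neighbors[cur_index], 1, -1, -1, None)]
--     ret = 1
--     while stack:
--         node, rest, best, max1, max2, pending = stack.pop()
--         if pending is not None:
--             # a child just finished; fold its result into this frame
--             if ret > best:
--                 best = ret
--             s = sub_size[pending]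
--             if s > max1:
--                 max1, max2 = s, max1
--             elif s > max2:
--                 max2 = s
--             stack.append((node, rest, best, max1, max2, None))
--             continue
--         while rest and visited[rest[0]]:
--             rest = rest[1:]
--         if rest:
--             j = rest[0]
--             visited[j] = True
--             sub_size[j] = 1
--             stack.append((node, rest[1:], best, max1, max2, j))
--             stack.append((j, neighbors[j], 1, -1, -1, None))
--         else:
--             best = max(best, max1 + 1)
--             best = max(best, max1 + max2 + 1)
--             sub_size[node] = max(sub_size[node], max1 + 1)
--             ret = best
--     return ret
-- ===== Notes on version B (the rewrite author's own statement) =====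
-- stated objective: alternative
-- what changed: A's recursive DFS is replaced by an iterative post-order traversal driven by an explicit stack of frames (node, remaining neighbors, best, max1, max2, pending child): a frame resumes when its pending child's result arrives and finalizes when its neighbor list is exhausted; the same in-place visited/sub_size updates and two-max combination are performed without any recursion.
-- outside the precondition, e.g. on dfs(0, [[], [5]], [0, 0], [False, False]): A returns 1, B returns 1; on dfs(0, [[1], [0], [99]], [0, 0, 0], [False, False]): A returns 2, B returns 2
import Mathlib
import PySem

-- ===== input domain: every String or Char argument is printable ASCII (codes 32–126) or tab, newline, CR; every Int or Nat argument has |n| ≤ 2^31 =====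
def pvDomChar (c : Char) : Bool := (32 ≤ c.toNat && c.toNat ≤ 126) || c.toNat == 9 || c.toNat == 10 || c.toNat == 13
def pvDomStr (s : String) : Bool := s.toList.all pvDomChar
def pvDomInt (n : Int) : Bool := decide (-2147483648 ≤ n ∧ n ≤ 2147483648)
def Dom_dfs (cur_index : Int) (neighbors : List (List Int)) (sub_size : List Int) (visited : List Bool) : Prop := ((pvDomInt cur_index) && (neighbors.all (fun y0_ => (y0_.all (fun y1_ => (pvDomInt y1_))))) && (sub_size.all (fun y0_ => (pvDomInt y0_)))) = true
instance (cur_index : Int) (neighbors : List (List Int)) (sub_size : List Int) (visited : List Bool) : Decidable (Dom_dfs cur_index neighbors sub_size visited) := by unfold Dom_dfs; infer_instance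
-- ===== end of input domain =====

-- B replaces A's recursive DFS by an iterative post-order traversal with an explicit stack of frames
-- (node, remaining neighbors, best, max1, max2, pending child); it performs the same in-place updates
-- of visited and sub_size as A, so the equivalence of return values is proved on identical final state.

-- ===== PORT A =====
def pvIdx (i : Int) (n : Nat) : Nat := (if i < 0 then i + (n : Int) else i).toNat

-- the body of A's for-loop (state: best, max1, max2, sub_size, visited; rec = recursive call)
def dfsAstep (rec : Int → List Int → List Bool → Int × List Int × List Bool)
    (st : Int × Int × Int × List Int × List Bool) (j : Int) : Int × Int × Int × List Int × List Bool :=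
  match st with
  | (best, max1, max2, ss, vis) =>
    if vis.getD (pvIdx j vis.length) false = false then
      match rec j ss vis with
      | (b, ss', vis') =>
        let best := max b best
        let sj := ss'.getD (pvIdx j ss'.length) 0
        if sj > max1 then (best, sj, max1, ss', vis')
        else if sj > max2 then (best, max1, sj, ss', vis')
        else (best, max1, max2, ss', vis')
    else st

def dfsA (fuel : Nat) (i : Int) (nb : List (List Int)) (ss : List Int) (vis : List Bool) : Int × List Int × List Bool :=
  match fuel with
  | 0 => (1, ss, vis)
  | fuel + 1 =>
    let vis1 := vis.set (pvIdx i vis.length) true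
    let ss1 := ss.set (pvIdx i ss.length) 1
    let r := (nb.getD (pvIdx i nb.length) []).foldl
      (dfsAstep (fun j ss vis => dfsA fuel j nb ss vis)) (1, -1, -1, ss1, vis1)
    let best := max r.1 (r.2.1 + 1)
    let best := max best (r.2.1 + r.2.2.1 + 1)
    (best, r.2.2.2.1.set (pvIdx i r.2.2.2.1.length) (max (r.2.2.2.1.getD (pvIdx i r.2.2.2.1.length) 0) (r.2.1 + 1)), r.2.2.2.2)

def dfs (cur_index : Int) (neighbors : List (List Int)) (sub_size : List Int) (visited : List Bool) : Int :=
  (dfsA (visited.length + 1) cur_index neighbors sub_size visited).1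

-- ===== PORT B =====
-- a stack frame of B's while loop: (node, remaining neighbors, best, max1, max2, pending child)
abbrev PVFrame := Int × List Int × Int × Int × Int × Option Int

-- B's while loop; one unit of fuel per loop iteration (pop); the fuel in dfs_alt is always sufficient
def runB (fuel : Nat) (nb : List (List Int)) (stack : List PVFrame)
    (ss : List Int) (vis : List Bool) (ret : Int) : Int × List Int × List Bool :=
  match stack with
  | [] => (ret, ss, vis)
  | (node, rest, best, max1, max2, pend) :: stk =>
    match fuel with
    | 0 => (ret, ss, vis)
    | fuel + 1 =>
      match pend with
      | some j =>
        let best := if ret > best then ret else best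
        let s := ss.getD (pvIdx j ss.length) 0
        if s > max1 then runB fuel nb ((node, rest, best, s, max1, none) :: stk) ss vis ret
        else if s > max2 then runB fuel nb ((node, rest, best, max1, s, none) :: stk) ss vis ret
        else runB fuel nb ((node, rest, best, max1, max2, none) :: stk) ss vis ret
      | none =>
        match rest.dropWhile (fun x => vis.getD (pvIdx x vis.length) false) with
        | j :: rest' =>
          runB fuel nb
            ((j, nb.getD (pvIdx j nb.length) [], 1, -1, -1, none) :: (node, rest', best, max1, max2, some j) :: stk)
            (ss.set (pvIdx j ss.length) 1) (vis.set (pvIdx j vis.length) true) ret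
        | [] =>
          let best := max best (max1 + 1)
          let best := max best (max1 + max2 + 1)
          runB fuel nb stk
            (ss.set (pvIdx node ss.length) (max (ss.getD (pvIdx node ss.length) 0) (max1 + 1))) vis best

def dfs_alt (cur_index : Int) (neighbors : List (List Int)) (sub_size : List Int) (visited : List Bool) : Int :=
  (runB (3 * visited.length + 1) neighbors
    [(cur_index, neighbors.getD (pvIdx cur_index neighbors.length) [], 1, -1, -1, none)]
    (sub_size.set (pvIdx cur_index sub_size.length) 1)
    (visited.set (pvIdx cur_index visited.length) true) 1).1

-- ===== PRECONDITION & SPEC =====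
-- j is a valid Python index for a list of length n
def pvInR (i : Int) (n : Nat) : Prop := -(n : Int) ≤ i ∧ i < (n : Int)

-- node j can still be visited: a valid index whose visited entry is False
def pvCanVisit (vis : List Bool) (j : Int) : Prop :=
  pvInR j vis.length ∧ vis.getD (pvIdx j vis.length) false = false

-- Pre_ requires cur_index to be a valid Python index for all three lists (negative wraparound is
-- supported), and every entry j of every neighbor list that the traversal could iterate (the list of
-- cur_index or of any node that is still unvisited) to be a valid index of visited, and — if j itself is
-- still unvisited, so that the DFS may recurse into it — of sub_size and neighbors too.  On such inputs A
-- always returns; on the excluded inputs A raises IndexError unless the invalid entry is never reached,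
-- which depends on the traversal itself, so Pre_ excludes all of them (see the cited examples where A
-- happens to return).
def Pre_dfs (cur_index : Int) (neighbors : List (List Int)) (sub_size : List Int) (visited : List Bool) : Prop :=
  pvInR cur_index visited.length ∧ pvInR cur_index sub_size.length ∧ pvInR cur_index neighbors.length ∧
  ∀ p ∈ List.range neighbors.length,
    (p = pvIdx cur_index neighbors.length ∨ pvCanVisit visited p ∨ pvCanVisit visited ((p : Int) - neighbors.length)) →
    ∀ j ∈ neighbors.getD p [], pvInR j visited.length ∧
      (visited.getD (pvIdx j visited.length) false = false → pvInR j sub_size.length ∧ pvInR j neighbors.length)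
instance (cur_index : Int) (neighbors : List (List Int)) (sub_size : List Int) (visited : List Bool) : Decidable (Pre_dfs cur_index neighbors sub_size visited) := by unfold Pre_dfs pvCanVisit pvInR; infer_instance

def pvWitness_dfs : Int × List (List Int) × List Int × List Bool :=
  (0, [[1, 2], [0], [0, 3], [2]], [0, 0, 0, 0], [false, false, false, false])

def Spec_dfs (cur_index : Int) (neighbors : List (List Int)) (sub_size : List Int) (visited : List Bool) (out : Int) : Prop := out = dfs_alt cur_index neighbors sub_size visited
instance (cur_index : Int) (neighbors : List (List Int)) (sub_size : List Int) (visited : List Bool) (out : Int) : Decidable (Spec_dfs cur_index neighbors sub_size visited out) := by unfold Spec_dfs; infer_instance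

-- ===== CLAIM (what is proved, stated in full; the proofs are below) =====
def Claim_equal_dfs : Prop := ∀ (cur_index : Int) (neighbors : List (List Int)) (sub_size : List Int) (visited : List Bool), Dom_dfs cur_index neighbors sub_size visited → Pre_dfs cur_index neighbors sub_size visited → Spec_dfs cur_index neighbors sub_size visited (dfs cur_index neighbors sub_size visited)

-- ===== LEMMAS AND PROOFS =====

theorem pvIdx_lt {i : Int} {n : Nat} (h : pvInR i n) : pvIdx i n < n := by
  obtain ⟨h1, h2⟩ := h; unfold pvIdx; split <;> omega

theorem pvIdx_cases {j : Int} {n : Nat} (h : pvInR j n) :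
    j = (pvIdx j n : Int) ∨ j = (pvIdx j n : Int) - n := by
  obtain ⟨h1, h2⟩ := h; unfold pvIdx; split <;> [right; left] <;> omega

theorem pvGetD_set_self {α : Type} (l : List α) (k : Nat) (v d : α) (hk : k < l.length) : (l.set k v).getD k d = v := by
  simp [List.getD_eq_getElem?_getD, hk]

theorem pvGetD_set_ne {α : Type} (l : List α) (k m : Nat) (v d : α) (h : k ≠ m) : (l.set k v).getD m d = l.getD m d := by
  simp [List.getD_eq_getElem?_getD, List.getElem?_set_ne h]

theorem pvCount_set_true (l : List Bool) (k : Nat) (hk : k < l.length) (hf : l.getD k false = false) :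
    (l.set k true).count false + 1 = l.count false := by
  induction l generalizing k with
  | nil => simp at hk
  | cons a l ih =>
    cases k with
    | zero => simp at hf; simp [hf]
    | succ k =>
      simp at hk hf
      cases a <;> simp at hf ⊢ <;>
        (have := ih k hk (by simpa using hf); omega)

-- machine steps, isolated as rewriting lemmas
theorem runB_push (f : Nat) (nb : List (List Int)) (node : Int) (rest : List Int) (best m1 m2 : Int)
    (j : Int) (rest' : List Int) (stk : List PVFrame) (ss : List Int) (vis : List Bool) (ret : Int)
    (h : rest.dropWhile (fun x => vis.getD (pvIdx x vis.length) false) = j :: rest') :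
    runB (f + 1) nb ((node, rest, best, m1, m2, none) :: stk) ss vis ret
    = runB f nb
        ((j, nb.getD (pvIdx j nb.length) [], 1, -1, -1, none) :: (node, rest', best, m1, m2, some j) :: stk)
        (ss.set (pvIdx j ss.length) 1) (vis.set (pvIdx j vis.length) true) ret := by
  simp only [runB, h]

theorem runB_fin (f : Nat) (nb : List (List Int)) (node : Int) (rest : List Int) (best m1 m2 : Int)
    (stk : List PVFrame) (ss : List Int) (vis : List Bool) (ret : Int)
    (h : rest.dropWhile (fun x => vis.getD (pvIdx x vis.length) false) = []) :
    runB (f + 1) nb ((node, rest, best, m1, m2, none) :: stk) ss vis ret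
    = runB f nb stk
        (ss.set (pvIdx node ss.length) (max (ss.getD (pvIdx node ss.length) 0) (m1 + 1))) vis
        (max (max best (m1 + 1)) (m1 + m2 + 1)) := by
  simp only [runB, h]

theorem runB_pend (f : Nat) (nb : List (List Int)) (node : Int) (rest : List Int) (best m1 m2 : Int)
    (j : Int) (stk : List PVFrame) (ss : List Int) (vis : List Bool) (ret : Int) :
    runB (f + 1) nb ((node, rest, best, m1, m2, some j) :: stk) ss vis ret
    = (let s := ss.getD (pvIdx j ss.length) 0;
       if s > m1 then runB f nb ((node, rest, max ret best, s, m1, none) :: stk) ss vis ret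
       else if s > m2 then runB f nb ((node, rest, max ret best, m1, s, none) :: stk) ss vis ret
       else runB f nb ((node, rest, max ret best, m1, m2, none) :: stk) ss vis ret) := by
  have hb : (if ret > best then ret else best) = max ret best := by
    rw [Int.max_def]; split_ifs <;> omega
  simp only [runB, hb]

theorem runB_nil (f : Nat) (nb : List (List Int)) (ss : List Int) (vis : List Bool) (ret : Int) :
    runB f nb [] ss vis ret = (ret, ss, vis) := by
  cases f <;> rfl

-- skipping an already-visited neighbor costs no fuel
theorem runB_skip (f : Nat) (nb : List (List Int)) (node : Int) (j : Int) (l : List Int)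
    (best m1 m2 : Int) (stk : List PVFrame) (ss : List Int) (vis : List Bool) (ret : Int)
    (h : vis.getD (pvIdx j vis.length) false = true) :
    runB f nb ((node, j :: l, best, m1, m2, none) :: stk) ss vis ret
    = runB f nb ((node, l, best, m1, m2, none) :: stk) ss vis ret := by
  have h' : vis[pvIdx j vis.length]?.getD false = true := by
    rw [← List.getD_eq_getElem?_getD]; exact h
  have hd : (j :: l).dropWhile (fun x => vis.getD (pvIdx x vis.length) false)
      = l.dropWhile (fun x => vis.getD (pvIdx x vis.length) false) := by
    simp [h']
  cases f with
  | zero => rfl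
  | succ f => simp only [runB, hd]

-- the simulation invariant: A's recursive call and B's machine from the corresponding frame agree,
-- with the machine's step count C bounded by the number of newly visited nodes
def pvSim (fuelA : Nat) (i : Int) (nb : List (List Int)) (ss : List Int) (vis : List Bool) : Prop :=
  (dfsA fuelA i nb ss vis).2.1.length = ss.length ∧
  (dfsA fuelA i nb ss vis).2.2.length = vis.length ∧
  (∀ k, (vis.set (pvIdx i vis.length) true).getD k false = true → (dfsA fuelA i nb ss vis).2.2.getD k false = true) ∧
  (dfsA fuelA i nb ss vis).2.2.count false ≤ (vis.set (pvIdx i vis.length) true).count false ∧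
  ∃ C, C + 3 * (dfsA fuelA i nb ss vis).2.2.count false ≤ 1 + 3 * (vis.set (pvIdx i vis.length) true).count false ∧
    ∀ (stk : List PVFrame) (ret : Int) (F : Nat),
      runB (C + F) nb ((i, nb.getD (pvIdx i nb.length) [], 1, -1, -1, none) :: stk)
        (ss.set (pvIdx i ss.length) 1) (vis.set (pvIdx i vis.length) true) ret
      = runB F nb stk (dfsA fuelA i nb ss vis).2.1 (dfsA fuelA i nb ss vis).2.2 (dfsA fuelA i nb ss vis).1

theorem pvLoop (fuel : Nat) (nb : List (List Int)) (n : Nat) (ss1' : List Int)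
    (IH : ∀ (i : Int) (ss : List Int) (vis : List Bool),
      pvInR i vis.length → pvInR i ss.length → pvInR i nb.length →
      (∀ p : Nat, p < nb.length →
        (p = pvIdx i nb.length ∨ pvCanVisit vis p ∨ pvCanVisit vis ((p : Int) - nb.length)) →
        ∀ j ∈ nb.getD p [], pvInR j vis.length ∧
          (vis.getD (pvIdx j vis.length) false = false → pvInR j ss.length ∧ pvInR j nb.length)) →
      (vis.set (pvIdx i vis.length) true).count false < fuel →
      pvSim fuel i nb ss vis)
    (vis0 : List Bool) (hv0 : vis0.length = n)
    (hnb0 : ∀ p : Nat, p < nb.length → (pvCanVisit vis0 p ∨ pvCanVisit vis0 ((p : Int) - nb.length)) →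
      ∀ j ∈ nb.getD p [], pvInR j n ∧
        (vis0.getD (pvIdx j n) false = false → pvInR j ss1'.length ∧ pvInR j nb.length))
    (vis1 : List Bool) (ss1 : List Int) (hv1 : vis1.length = n)
    (hs1 : ss1'.length = ss1.length)
    (hv01 : ∀ k, vis0.getD k false = true → vis1.getD k false = true) :
    ∀ (l : List Int), (∀ j ∈ l, pvInR j n ∧
      (vis0.getD (pvIdx j n) false = false → pvInR j ss1.length ∧ pvInR j nb.length)) →
    ∀ (best m1 m2 : Int) (ssc : List Int) (visc : List Bool),
      ssc.length = ss1.length → visc.length = n →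
      (∀ k, vis1.getD k false = true → visc.getD k false = true) →
      visc.count false ≤ vis1.count false →
      vis1.count false ≤ fuel →
      (let rA := l.foldl (dfsAstep (fun j ss vis => dfsA fuel j nb ss vis)) (best, m1, m2, ssc, visc);
       rA.2.2.2.1.length = ss1.length ∧ rA.2.2.2.2.length = n ∧
       (∀ k, vis1.getD k false = true → rA.2.2.2.2.getD k false = true) ∧
       rA.2.2.2.2.count false ≤ visc.count false ∧
       ∃ C, C + 3 * rA.2.2.2.2.count false ≤ 1 + 3 * visc.count false ∧
         ∀ (node : Int) (stk : List PVFrame) (ret : Int) (F : Nat),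
           runB (C + F) nb ((node, l, best, m1, m2, none) :: stk) ssc visc ret
           = runB F nb stk
               (rA.2.2.2.1.set (pvIdx node rA.2.2.2.1.length)
                 (max (rA.2.2.2.1.getD (pvIdx node rA.2.2.2.1.length) 0) (rA.2.1 + 1)))
               rA.2.2.2.2
               (max (max rA.1 (rA.2.1 + 1)) (rA.2.1 + rA.2.2.1 + 1))) := by
  intro l
  induction l with
  | nil =>
    intro _ best m1 m2 ssc visc hssl hvl hmono hcnt hfuel
    simp only [List.foldl_nil]
    refine ⟨hssl, hvl, hmono, le_rfl, 1, by omega, ?_⟩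
    intro node stk ret F
    have e1 : 1 + F = F + 1 := by omega
    rw [e1, runB_fin _ _ _ _ _ _ _ _ _ _ _ (by simp)]
  | cons j l ihl =>
    intro hl best m1 m2 ssc visc hssl hvl hmono hcnt hfuel
    obtain ⟨hjr, hjcond⟩ := hl j (by simp)
    have hjlt : pvIdx j n < n := pvIdx_lt hjr
    have hltail : ∀ x ∈ l, pvInR x n ∧
        (vis0.getD (pvIdx x n) false = false → pvInR x ss1.length ∧ pvInR x nb.length) :=
      fun x hx => hl x (by simp [hx])
    simp only [List.foldl_cons, dfsAstep]
    by_cases hvj : visc.getD (pvIdx j visc.length) false = false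
    · -- unvisited: the machine pushes a frame for j; A recurses into j
      have hcnt2 : (visc.set (pvIdx j visc.length) true).count false < fuel := by
        have := pvCount_set_true visc (pvIdx j visc.length) (by rw [hvl]; omega) hvj
        omega
      have hv0j : vis0.getD (pvIdx j n) false = false := by
        cases hbe : vis0.getD (pvIdx j n) false
        · rfl
        · exfalso
          have := hmono (pvIdx j n) (hv01 _ hbe)
          rw [hvl] at hvj
          rw [this] at hvj
          exact Bool.true_eq_false.mp hvj
      obtain ⟨hjrS, hjrN⟩ := hjcond hv0j
      have canTrans : ∀ q : Int, pvCanVisit visc q → pvCanVisit vis0 q := by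
        intro q ⟨hq1, hq2⟩
        refine ⟨by rw [hv0, ← hvl]; exact hq1, ?_⟩
        cases hbe : vis0.getD (pvIdx q vis0.length) false
        · rfl
        · exfalso
          rw [hv0] at hbe
          have := hmono (pvIdx q n) (hv01 _ hbe)
          rw [hvl] at hq2
          rw [this] at hq2
          exact Bool.true_eq_false.mp hq2
      have entryTrans : ∀ p : Nat, p < nb.length →
          (pvCanVisit vis0 p ∨ pvCanVisit vis0 ((p : Int) - nb.length)) →
          ∀ j2 ∈ nb.getD p [], pvInR j2 visc.length ∧
            (visc.getD (pvIdx j2 visc.length) false = false → pvInR j2 ssc.length ∧ pvInR j2 nb.length) := by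
        intro p hp hcase j2 hj2
        obtain ⟨b1, b2⟩ := hnb0 p hp hcase j2 hj2
        refine ⟨by rw [hvl]; exact b1, ?_⟩
        intro hvc
        have hv02 : vis0.getD (pvIdx j2 n) false = false := by
          cases hbe : vis0.getD (pvIdx j2 n) false
          · rfl
          · exfalso
            have := hmono (pvIdx j2 n) (hv01 _ hbe)
            rw [hvl] at hvc
            rw [this] at hvc
            exact Bool.true_eq_false.mp hvc
        obtain ⟨d1, d2⟩ := b2 hv02
        exact ⟨by rw [hssl, ← hs1]; exact d1, d2⟩
      have hcanj : pvCanVisit vis0 j := ⟨by rw [hv0]; exact hjr, by rw [hv0]; exact hv0j⟩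
      have hpost := IH j ssc visc (by rw [hvl]; exact hjr) (by rw [hssl]; exact hjrS) hjrN
        (by intro p hp hcase j2 hj2
            rcases hcase with hc | hc | hc
            · subst hc
              rcases pvIdx_cases hjrN with he | he
              · exact entryTrans _ hp (Or.inl (he ▸ hcanj)) j2 hj2
              · exact entryTrans _ hp (Or.inr (he ▸ hcanj)) j2 hj2
            · exact entryTrans p hp (Or.inl (canTrans _ hc)) j2 hj2
            · exact entryTrans p hp (Or.inr (canTrans _ hc)) j2 hj2) hcnt2
      unfold pvSim at hpost
      rcases hA : dfsA fuel j nb ssc visc with ⟨bA, ssA, visA⟩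
      rw [hA] at hpost
      obtain ⟨hsl', hvl', hmon', hcnt', Cc, hCcB, hCcEq⟩ := hpost
      simp only at hsl' hvl' hmon' hcnt' hCcB hCcEq
      simp only [hvj, if_true]
      have hsetcnt := pvCount_set_true visc (pvIdx j visc.length) (by rw [hvl]; omega) hvj
      have hmono2 : ∀ k, vis1.getD k false = true → visA.getD k false = true := by
        intro k hk
        have hvk : visc.getD k false = true := hmono k hk
        apply hmon' k
        by_cases he : k = pvIdx j visc.length
        · rw [he, pvGetD_set_self _ _ _ _ (by rw [hvl]; omega)]
        · rw [pvGetD_set_ne _ _ _ _ _ (fun h2 => he h2.symm)]; exact hvk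
      have hcnt3 : visA.count false ≤ vis1.count false := by omega
      have hvj' : visc[pvIdx j visc.length]?.getD false = false := by
        rw [← List.getD_eq_getElem?_getD]; exact hvj
      have hdw : (j :: l).dropWhile (fun x => visc.getD (pvIdx x visc.length) false) = j :: l := by
        simp [hvj']
      split_ifs with hgt1 hgt2
      · obtain ⟨c1, c2, c3, c4, Cr, hCrB, hCrEq⟩ :=
          ihl hltail (max bA best) (ssA.getD (pvIdx j ssA.length) 0) m1 ssA visA
            (by omega) (by omega) hmono2 hcnt3 hfuel
        refine ⟨c1, c2, c3, by omega, 1 + Cc + (1 + Cr), by omega, ?_⟩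
        intro node stk ret F
        have e1 : (1 + Cc + (1 + Cr)) + F = (Cc + ((Cr + F) + 1)) + 1 := by omega
        rw [e1, runB_push _ _ _ _ _ _ _ j l _ _ _ _ hdw, hCcEq, runB_pend]
        simp only []
        rw [if_pos hgt1]
        exact hCrEq node stk bA F
      · obtain ⟨c1, c2, c3, c4, Cr, hCrB, hCrEq⟩ :=
          ihl hltail (max bA best) m1 (ssA.getD (pvIdx j ssA.length) 0) ssA visA
            (by omega) (by omega) hmono2 hcnt3 hfuel
        refine ⟨c1, c2, c3, by omega, 1 + Cc + (1 + Cr), by omega, ?_⟩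
        intro node stk ret F
        have e1 : (1 + Cc + (1 + Cr)) + F = (Cc + ((Cr + F) + 1)) + 1 := by omega
        rw [e1, runB_push _ _ _ _ _ _ _ j l _ _ _ _ hdw, hCcEq, runB_pend]
        simp only []
        rw [if_neg hgt1, if_pos hgt2]
        exact hCrEq node stk bA F
      · obtain ⟨c1, c2, c3, c4, Cr, hCrB, hCrEq⟩ :=
          ihl hltail (max bA best) m1 m2 ssA visA
            (by omega) (by omega) hmono2 hcnt3 hfuel
        refine ⟨c1, c2, c3, by omega, 1 + Cc + (1 + Cr), by omega, ?_⟩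
        intro node stk ret F
        have e1 : (1 + Cc + (1 + Cr)) + F = (Cc + ((Cr + F) + 1)) + 1 := by omega
        rw [e1, runB_push _ _ _ _ _ _ _ j l _ _ _ _ hdw, hCcEq, runB_pend]
        simp only []
        rw [if_neg hgt1, if_neg hgt2]
        exact hCrEq node stk bA F
    · -- already visited: A's step is the identity, the machine skips j for free
      have hvjT : visc.getD (pvIdx j visc.length) false = true := by
        cases hbe : visc.getD (pvIdx j visc.length) false
        · exact absurd hbe hvj
        · rfl
      simp only [hvjT, Bool.true_eq_false, if_false]
      obtain ⟨c1, c2, c3, c4, C, hCB, hCEq⟩ :=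
        ihl hltail best m1 m2 ssc visc hssl hvl hmono hcnt hfuel
      refine ⟨c1, c2, c3, c4, C, hCB, ?_⟩
      intro node stk ret F
      rw [runB_skip _ _ _ _ _ _ _ _ _ _ _ _ (by rw [hvl] at hvjT ⊢; exact hvjT)]
      exact hCEq node stk ret F

theorem pvMain (fuel : Nat) : ∀ (i : Int) (nb : List (List Int)) (ss : List Int) (vis : List Bool),
    pvInR i vis.length → pvInR i ss.length → pvInR i nb.length →
    (∀ p : Nat, p < nb.length →
      (p = pvIdx i nb.length ∨ pvCanVisit vis p ∨ pvCanVisit vis ((p : Int) - nb.length)) →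
      ∀ j ∈ nb.getD p [], pvInR j vis.length ∧
        (vis.getD (pvIdx j vis.length) false = false → pvInR j ss.length ∧ pvInR j nb.length)) →
    (vis.set (pvIdx i vis.length) true).count false < fuel →
    pvSim fuel i nb ss vis := by
  induction fuel with
  | zero => intro i nb ss vis _ _ _ _ hf; omega
  | succ fuel IH =>
    intro i nb ss vis hir hirS hirN hnb hfuel
    have hilt : pvIdx i vis.length < vis.length := pvIdx_lt hir
    have hiltS : pvIdx i ss.length < ss.length := pvIdx_lt hirS
    have hloop := pvLoop fuel nb vis.length ss
      (fun i2 ss2 vis2 h1 h2 h3 h4 h5 => IH i2 nb ss2 vis2 h1 h2 h3 h4 h5)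
      vis rfl (fun p hp hc => hnb p hp (Or.inr hc))
      (vis.set (pvIdx i vis.length) true) (ss.set (pvIdx i ss.length) 1) (by simp) (by simp)
      (by
        intro k hk
        by_cases he : k = pvIdx i vis.length
        · rw [he]; exact pvGetD_set_self _ _ _ _ (by simpa using hilt)
        · rw [pvGetD_set_ne _ _ _ _ _ (fun h2 => he h2.symm)]; exact hk)
      (nb.getD (pvIdx i nb.length) [])
      (by
        intro j hj
        obtain ⟨a1, a2⟩ := hnb (pvIdx i nb.length) (pvIdx_lt hirN) (Or.inl rfl) j hj
        exact ⟨a1, fun hf => ⟨by simpa using (a2 hf).1, (a2 hf).2⟩⟩)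
      1 (-1) (-1) (ss.set (pvIdx i ss.length) 1) (vis.set (pvIdx i vis.length) true)
      rfl (by simp) (fun k hk => hk) le_rfl (by omega)
    obtain ⟨c1, c2, c3, c4, C, hCB, hCEq⟩ := hloop
    unfold pvSim
    simp only [dfsA]
    refine ⟨?_, ?_, c3, c4, C, hCB, ?_⟩
    · simp only [List.length_set] at c1 ⊢; exact c1
    · exact c2
    · intro stk ret F
      exact hCEq i stk ret F

-- ===== VERDICT (by name: the statement is the Claim_ definition above) =====
theorem dfs_spec : Claim_equal_dfs := by
  intro cur nb ss vis _ hpre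
  obtain ⟨h1, h2, h3, h4⟩ := hpre
  have hm := pvMain (vis.length + 1) cur nb ss vis h1 h2 h3
    (fun p hp hc => h4 p (List.mem_range.mpr hp) hc)
    (by
      have := List.count_le_length (l := vis.set (pvIdx cur vis.length) true) (a := false)
      simp only [List.length_set] at this
      omega)
  obtain ⟨_, _, _, _, C, hCB, hCEq⟩ := hm
  have hCle : C ≤ 3 * vis.length + 1 := by
    have := List.count_le_length (l := vis.set (pvIdx cur vis.length) true) (a := false)
    simp only [List.length_set] at this
    omega
  unfold Spec_dfs dfs dfs_alt
  have e : 3 * vis.length + 1 = C + (3 * vis.length + 1 - C) := by omega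
  rw [e, hCEq, runB_nil]
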